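-- pv_equiv track=rewrite | github.com/betterxys/betterxys.github.io | coding/0626-interview.py | step
-- ===== SOURCE A (Python) =====
-- def step(n):
--     """step by step like the pace of the devil.
--
--     Params:
--         n:   total steps.
--
--     Return:
--         count of posibilities.
--     """
--     if n == 2:
--         return 2
--     elif n == 1:
--         return 1
--     elif n == 0:
--         return 0
--     elif n > 2:
--         return step(n-1) + step(n-2)
-- ===== SOURCE B (Python) =====
-- def step(n):
--     """step by step like the pace of the devil.
--
--     Params:
--         n:   total steps.
--
--     Return:
--         count of posibilities.
--     """
--     if n == 0:
--         return 0
--     a, b = 1, 2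
--     for _ in range(n - 1):
--         a, b = b, a + b
--     return a
-- ===== Notes on version B (the rewrite author's own statement) =====
-- stated objective: faster
-- what changed: replaces the naive exponential double recursion with an iterative two-variable Fibonacci loop
-- outside the precondition, e.g. on step(-1): A returns None, B returns 1
import Mathlib
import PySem

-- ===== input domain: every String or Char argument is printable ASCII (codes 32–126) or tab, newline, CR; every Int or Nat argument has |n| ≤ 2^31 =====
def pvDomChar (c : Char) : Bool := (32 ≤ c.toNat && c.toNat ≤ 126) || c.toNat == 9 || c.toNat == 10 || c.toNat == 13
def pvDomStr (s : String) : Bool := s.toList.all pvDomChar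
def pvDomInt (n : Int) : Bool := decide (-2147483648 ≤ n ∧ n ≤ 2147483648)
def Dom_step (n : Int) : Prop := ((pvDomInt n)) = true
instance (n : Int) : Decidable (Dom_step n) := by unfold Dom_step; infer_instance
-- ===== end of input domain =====

-- B replaces the exponential double recursion of A with an iterative two-variable loop (asymptotically faster).

-- ===== PORT A =====
def step (n : Int) : Int :=
  if n == 2 then 2
  else if n == 1 then 1
  else if n == 0 then 0
  else if n > 2 then step (n - 1) + step (n - 2)
  else 0  -- Python returns None here (falls off the function); excluded by Pre_step
termination_by n.toNat
decreasing_by all_goals omega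

-- ===== PORT B =====
def step_alt (n : Int) : Int :=
  if n == 0 then 0
  else ((PySem.List.pyRange 0 (n - 1) 1).foldl
    (fun (ab : Int × Int) _ => (ab.2, ab.1 + ab.2)) (1, 2)).1

-- ===== PRECONDITION & SPEC =====
-- Pre_ excludes negative n, on which A falls through every branch and returns None (not an int),
-- and n > 900, where A's leftmost recursive descent is ~n frames deep and so exceeds Python's
-- recursion limit and raises RecursionError (900 safely under-approximates CPython's default limit 1000).
def Pre_step (n : Int) : Prop := 0 ≤ n ∧ n ≤ 900
instance (n : Int) : Decidable (Pre_step n) := by unfold Pre_step; infer_instance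
def pvWitness_step : Int := 5
def Spec_step (n : Int) (out : Int) : Prop := out = step_alt n
instance (n : Int) (out : Int) : Decidable (Spec_step n out) := by unfold Spec_step; infer_instance

-- ===== CLAIM (what is proved, stated in full; the proofs are below) =====
def Claim_equal_step : Prop := ∀ (n : Int), Dom_step n → Pre_step n → Spec_step n (step n)

-- ===== LEMMAS AND PROOFS =====

def pvLoop (m : Nat) : Int × Int :=
  (PySem.List.pyRange 0 m 1).foldl (fun (ab : Int × Int) _ => (ab.2, ab.1 + ab.2)) (1, 2)

theorem step_one : step 1 = 1 := by rw [step]; simp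

theorem step_two : step 2 = 2 := by rw [step]; simp

theorem pvLoop_succ (m : Nat) : pvLoop (m + 1) = ((pvLoop m).2, (pvLoop m).1 + (pvLoop m).2) := by
  unfold pvLoop
  push_cast
  rw [PySem.List.pyRange_one_succ_right (by exact_mod_cast Nat.zero_le m)]
  simp

theorem step_rec (n : Int) (h : n > 2) : step n = step (n - 1) + step (n - 2) := by
  rw [step]
  have h1 : ¬ (n == 2) = true := by simp; omega
  have h2 : ¬ (n == 1) = true := by simp; omega
  have h3 : ¬ (n == 0) = true := by simp; omega
  simp [h1, h2, h3, h]

theorem pvLoop_step (m : Nat) : pvLoop m = (step ((m : Int) + 1), step ((m : Int) + 2)) := by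
  induction m with
  | zero =>
    simp only [Nat.cast_zero, zero_add]
    rw [step_one, step_two]
    simp [pvLoop, PySem.List.pyRange]
  | succ k ih =>
    rw [pvLoop_succ, ih]
    have : step ((k : Int) + 3) = step ((k : Int) + 2) + step ((k : Int) + 1) := by
      rw [step_rec ((k : Int) + 3) (by omega)]
      ring_nf
    push_cast at this ⊢
    refine Prod.ext ?_ ?_
    · simp; ring_nf
    · simp only []
      rw [show (k : Int) + 1 + 2 = (k : Int) + 3 by ring, this]
      ring

-- ===== VERDICT (by name: the statement is the Claim_ definition above) =====
theorem step_spec : Claim_equal_step := by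
  intro n _ hpre
  unfold Spec_step step_alt
  by_cases h0 : n = 0
  · simp [h0]; rw [step]; simp
  · have hn : 1 ≤ n := by unfold Pre_step at hpre; omega
    have hbeq : (n == 0) = false := by simp [h0]
    simp only [hbeq, Bool.false_eq_true, if_false]
    obtain ⟨m, hm⟩ : ∃ m : Nat, n = (m : Int) + 1 := ⟨(n - 1).toNat, by omega⟩
    have := pvLoop_step m
    unfold pvLoop at this
    rw [hm, show ((m : Int) + 1 - 1) = (m : Int) by ring, this]
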